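-- pv_equiv track=rewrite | github.com/q8hk/devtoys_tg_bot | src/core/utils/code_.py | minify_js
-- ===== SOURCE A (Python) =====
-- def _strip_js_comments(value: str) -> str:
--     result: list[str] = []
--     i = 0
--     length = len(value)
--     string_delimiter: str | None = None
--     in_single_line_comment = False
--     in_multi_line_comment = False
--
--     while i < length:
--         char = value[i]
--
--         if string_delimiter is not None:
--             result.append(char)
--             if char == string_delimiter and (i == 0 or value[i - 1] != "\\"):
--                 string_delimiter = None
--             i += 1
--             continue
--
--         if in_single_line_comment:
--             if char in "\r\n":
--                 in_single_line_comment = False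
--                 result.append(char)
--             i += 1
--             continue
--
--         if in_multi_line_comment:
--             if char == "*" and i + 1 < length and value[i + 1] == "/":
--                 in_multi_line_comment = False
--                 i += 2
--             else:
--                 i += 1
--             continue
--
--         if char in {'"', "'", "`"}:
--             string_delimiter = char
--             result.append(char)
--             i += 1
--             continue
--
--         if char == "/" and i + 1 < length:
--             nxt = value[i + 1]
--             if nxt == "/":
--                 in_single_line_comment = True
--                 i += 2
--                 continue
--             if nxt == "*":
--                 in_multi_line_comment = True
--                 i += 2
--                 continue
--
--         result.append(char)
--         i += 1
--
--     return "".join(result)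
--
-- def minify_js(value: str) -> str:
--     """Return a compact JavaScript string preserving string literals."""
--
--     js = _strip_js_comments(value)
--     result: list[str] = []
--     string_delimiter: str | None = None
--
--     for char in js:
--         if string_delimiter is not None:
--             result.append(char)
--             if char == string_delimiter and (len(result) < 2 or result[-2] != "\\"):
--                 string_delimiter = None
--             continue
--
--         if char in {'"', "'", "`"}:
--             string_delimiter = char
--             result.append(char)
--             continue
--
--         if char.isspace():
--             if result and result[-1] not in " \n\t\r\f{}[]():;,.+-*/%&|^!?<>=":
--                 result.append(" ")
--             continue
--
--         if char in "{}[]():;,.+-*/%&|^!?<>=":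
--             while result and result[-1] == " ":
--                 result.pop()
--             result.append(char)
--             continue
--
--         result.append(char)
--
--     return "".join(result).strip()
-- ===== SOURCE B (Python) =====
-- _OPS = "{}[]():;,.+-*/%&|^!?<>="
-- _TRIM = " \n\t\r\f" + _OPS
--
--
-- def _code_chars(value):
--     """Generate the characters that survive comment stripping, mode by mode."""
--     n = len(value)
--     i = 0
--     while i < n:
--         c = value[i]
--         if c in '"\'`':
--             yield c
--             i += 1
--             while i < n:  # string literal mode
--                 yield value[i]
--                 if value[i] == c and value[i - 1] != "\\":
--                     i += 1
--                     break
--                 i += 1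
--         elif c == "/" and i + 1 < n and value[i + 1] == "/":
--             i += 2
--             while i < n and value[i] not in "\r\n":  # line comment mode
--                 i += 1
--         elif c == "/" and i + 1 < n and value[i + 1] == "*":
--             i += 2
--             while i < n:  # block comment mode
--                 if value[i] == "*" and i + 1 < n and value[i + 1] == "/":
--                     i += 2
--                     break
--                 i += 1
--         else:
--             yield c
--             i += 1
--
--
-- def minify_js(value: str) -> str:
--     """Return a compact JavaScript string preserving string literals.
--
--     Consumes the comment-stripping generator directly and uses a pending-space
--     flag instead of appending spaces and popping them back off.
--     """
--     out = []
--     pending = False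
--     delim = None
--     for char in _code_chars(value):
--         if delim is not None:
--             out.append(char)
--             if char == delim and (len(out) < 2 or out[-2] != "\\"):
--                 delim = None
--         elif char in '"\'`':
--             if pending:
--                 out.append(" ")
--                 pending = False
--             out.append(char)
--             delim = char
--         elif char.isspace():
--             if out and not pending and out[-1] not in _TRIM:
--                 pending = True
--         elif char in _OPS:
--             pending = False
--             out.append(char)
--         else:
--             if pending:
--                 out.append(" ")
--                 pending = False
--             out.append(char)
--     return "".join(out).strip()
-- ===== Notes on version B (the rewrite author's own statement) =====
-- stated objective: alternative
-- what changed: Comment stripping becomes a mode-structured generator (one nested loop per mode: string/line-comment/block-comment) consumed directly by the minifier, and the minifier replaces A's append-space-then-pop-it-back mechanism by a pending-space flag that is flushed only when a non-operator character is emitted.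
import Mathlib
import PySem

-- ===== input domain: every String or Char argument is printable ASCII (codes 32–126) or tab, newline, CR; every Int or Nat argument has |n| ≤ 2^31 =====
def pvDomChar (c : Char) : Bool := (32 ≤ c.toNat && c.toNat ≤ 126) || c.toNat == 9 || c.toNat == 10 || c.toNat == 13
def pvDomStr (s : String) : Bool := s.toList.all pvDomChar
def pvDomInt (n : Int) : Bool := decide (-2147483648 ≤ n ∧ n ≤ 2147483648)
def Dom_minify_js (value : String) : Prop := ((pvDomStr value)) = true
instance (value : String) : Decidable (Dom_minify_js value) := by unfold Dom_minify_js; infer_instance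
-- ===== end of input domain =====

-- B restructures both passes: a mode-structured comment-stripping generator (one recursive function per
-- mode) feeds a minifier that keeps a pending-space flag instead of appending and popping spaces;
-- objective: alternative decomposition, same cost.

-- ===== PORT A =====
-- operator set "{}[]():;,.+-*/%&|^!?<>=" of minify_js
def pvOpsA : List Char :=
  ['{','}','[',']','(',')',':',';',',','.','+','-','*','/','%','&','|','^','!','?','<','>','=']
-- the set " \n\t\r\f{}[]():;,.+-*/%&|^!?<>=" of minify_js
def pvTrimA : List Char := [' ','\n','\t','\r','\x0C'] ++ pvOpsA

-- `while result and result[-1] == " ": result.pop()` on the reversed accumulator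
def popSpacesA : List Char → List Char
  | ' ' :: rest => popSpacesA rest
  | l => l

-- the body of minify_js's `for char in js` loop; the result list is kept reversed (append = cons)
def mstepA (st : Option Char × List Char) (c : Char) : Option Char × List Char :=
  match st with
  | (some d, acc) =>
    if c = d ∧ ((c :: acc).length < 2 ∨ (c :: acc)[1]? ≠ some '\\') then (none, c :: acc)
    else (some d, c :: acc)
  | (none, acc) =>
    if c = '"' ∨ c = '\'' ∨ c = '`' then (some c, c :: acc)
    else if PySem.Chars.isspace c then
      match acc with
      | [] => (none, acc)
      | h :: _ => if pvTrimA.contains h then (none, acc) else (none, ' ' :: acc)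
    else if pvOpsA.contains c then (none, c :: popSpacesA acc)
    else (none, c :: acc)

-- the while-loop of _strip_js_comments: prev = value[i-1] (none at i = 0), sd/sl/ml the three mode flags
def stripGo (prev sd : Option Char) (sl ml : Bool) (cs : List Char) : List Char :=
  match cs with
  | [] => []
  | c :: rest =>
    match sd with
    | some d =>
      if c = d ∧ (prev.isNone ∨ prev ≠ some '\\') then c :: stripGo (some c) none sl ml rest
      else c :: stripGo (some c) (some d) sl ml rest
    | none =>
      if sl then
        if c = '\r' ∨ c = '\n' then c :: stripGo (some c) none false ml rest
        else stripGo (some c) none true ml rest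
      else if ml then
        match _h : rest with
        | n :: rest2 =>
          if c = '*' ∧ n = '/' then stripGo (some n) none sl false rest2
          else stripGo (some c) none sl true rest
        | [] => stripGo (some c) none sl true []
      else if c = '"' ∨ c = '\'' ∨ c = '`' then
        c :: stripGo (some c) (some c) sl ml rest
      else
        match _h : rest with
        | n :: rest2 =>
          if c = '/' ∧ n = '/' then stripGo (some n) none true ml rest2
          else if c = '/' ∧ n = '*' then stripGo (some n) none sl true rest2
          else c :: stripGo (some c) none sl ml rest
        | [] => c :: stripGo (some c) none sl ml []
termination_by cs.length
decreasing_by all_goals simp_all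

def minify_js (value : String) : String :=
  let js := stripGo none none false false value.toList
  let fin := js.foldl mstepA (none, [])
  PySem.Str.strip (String.ofList fin.2.reverse)

-- ===== PORT B =====
-- B's module constants _OPS and _TRIM
def pvOpsB : List Char := "{}[]():;,.+-*/%&|^!?<>=".toList
def pvTrimB : List Char := " \n\t\r\x0C{}[]():;,.+-*/%&|^!?<>=".toList

-- the _code_chars generator, one function per mode (code / string literal / line comment / block comment)
mutual
def bCode : List Char → List Char
  | [] => []
  | c :: rest =>
    if c = '"' ∨ c = '\'' ∨ c = '`' then c :: bStr c c rest
    else if c = '/' ∧ rest.head? = some '/' then bLine rest.tail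
    else if c = '/' ∧ rest.head? = some '*' then bBlock rest.tail
    else c :: bCode rest
termination_by cs => cs.length
decreasing_by all_goals simp_all [List.length_tail]

def bStr (d prev : Char) : List Char → List Char
  | [] => []
  | c :: rest => c :: (if c = d ∧ prev ≠ '\\' then bCode rest else bStr d c rest)
termination_by cs => cs.length
decreasing_by all_goals simp

def bLine : List Char → List Char
  | [] => []
  | c :: rest => if c = '\r' ∨ c = '\n' then c :: bCode rest else bLine rest
termination_by cs => cs.length
decreasing_by all_goals simp

def bBlock : List Char → List Char
  | [] => []
  | c :: rest => if c = '*' ∧ rest.head? = some '/' then bCode rest.tail else bBlock rest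
termination_by cs => cs.length
decreasing_by all_goals simp_all [List.length_tail]
end

-- one iteration of B's minify loop; state = (out reversed, pending, delim)
def bstep (st : List Char × Bool × Option Char) (c : Char) : List Char × Bool × Option Char :=
  match st with
  | (res, p, some d) =>
    if c = d ∧ ((c :: res).length < 2 ∨ (c :: res)[1]? ≠ some '\\') then (c :: res, p, none)
    else (c :: res, p, some d)
  | (res, p, none) =>
    if c = '"' ∨ c = '\'' ∨ c = '`' then
      (c :: (if p then ' ' :: res else res), false, some c)
    else if PySem.Chars.isspace c then
      match res with
      | [] => (res, p, none)
      | h :: _ => if p = false ∧ pvTrimB.contains h = false then (res, true, none) else (res, p, none)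
    else if pvOpsB.contains c then (c :: res, false, none)
    else (c :: (if p then ' ' :: res else res), false, none)

def minify_js_alt (value : String) : String :=
  let fin := (bCode value.toList).foldl bstep ([], false, none)
  PySem.Str.strip (String.ofList fin.1.reverse)

-- ===== PRECONDITION & SPEC =====
def Spec_minify_js (value : String) (out : String) : Prop := out = minify_js_alt value
instance (value : String) (out : String) : Decidable (Spec_minify_js value out) := by unfold Spec_minify_js; infer_instance

-- ===== CLAIM (what is proved, stated in full; the proofs are below) =====
def Claim_equal_minify_js : Prop := ∀ (value : String), Dom_minify_js value → Spec_minify_js value (minify_js value)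

-- ===== LEMMAS AND PROOFS =====

theorem stripGo_nil (prev sd : Option Char) (sl ml : Bool) : stripGo prev sd sl ml [] = [] := by
  rw [stripGo.eq_def]

-- Part 1: B's mode functions compute exactly A's flag-driven comment stripper.
theorem stripEq (n : Nat) : ∀ cs : List Char, cs.length ≤ n →
    (∀ prev, stripGo prev none false false cs = bCode cs) ∧
    (∀ d p, stripGo (some p) (some d) false false cs = bStr d p cs) ∧
    (∀ prev, stripGo prev none true false cs = bLine cs) ∧
    (∀ prev, stripGo prev none false true cs = bBlock cs) := by
  induction n with
  | zero =>
    intro cs hcs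
    have : cs = [] := List.eq_nil_of_length_eq_zero (Nat.le_zero.mp hcs)
    subst this
    simp [stripGo, bCode, bStr, bLine, bBlock]
  | succ n ih =>
    intro cs hcs
    cases cs with
    | nil => simp [stripGo, bCode, bStr, bLine, bBlock]
    | cons c rest =>
      have hr : rest.length ≤ n := by simpa using Nat.lt_succ_iff.mp (by simpa using hcs)
      have ihr := ih rest hr
      refine ⟨?_, ?_, ?_, ?_⟩
      · -- code mode
        intro prev
        by_cases hq : c = '"' ∨ c = '\'' ∨ c = '`'
        · rw [stripGo.eq_def]; simp [bCode, hq, ihr.2.1]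
        · cases rest with
          | nil => rw [stripGo.eq_def]; simp [bCode, stripGo_nil, hq]
          | cons nx rest2 =>
            have hr2 : rest2.length ≤ n := by simp at hr ⊢; omega
            have ihr2 := ih rest2 hr2
            by_cases hsl : c = '/' ∧ nx = '/'
            · obtain ⟨rfl, rfl⟩ := hsl
              rw [stripGo.eq_def]; simp [bCode, ihr2.2.2.1]
            · by_cases hml : c = '/' ∧ nx = '*'
              · obtain ⟨rfl, rfl⟩ := hml
                rw [stripGo.eq_def]; simp [bCode, ihr2.2.2.2]
              · rw [stripGo.eq_def]; simp [bCode, hq, hsl, hml, ihr.1]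
      · -- string-literal mode
        intro d p
        by_cases hcl : c = d ∧ ¬ p = '\\'
        · obtain ⟨rfl, h2⟩ := hcl
          rw [stripGo.eq_def]; simp [bStr, h2, ihr.1]
        · rw [stripGo.eq_def]; simp [bStr, hcl, ihr.2.1]
      · -- line-comment mode
        intro prev
        by_cases hnl : c = '\r' ∨ c = '\n'
        · rw [stripGo.eq_def]; simp [bLine, hnl, ihr.1]
        · rw [stripGo.eq_def]; simp [bLine, hnl, ihr.2.2.1]
      · -- block-comment mode
        intro prev
        cases rest with
        | nil => rw [stripGo.eq_def]; simp [bBlock, stripGo_nil]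
        | cons nx rest2 =>
          have hr2 : rest2.length ≤ n := by simp at hr ⊢; omega
          have ihr2 := ih rest2 hr2
          by_cases hend : c = '*' ∧ nx = '/'
          · obtain ⟨rfl, rfl⟩ := hend
            rw [stripGo.eq_def]; simp [bBlock, ihr2.1]
          · rw [stripGo.eq_def]; simp [bBlock, hend, ihr.2.2.2]

-- Part 2: the pending-space machine simulates A's append-then-pop machine.
-- relA maps B's state to A's: A's result is out plus the pending space, same delimiter.
def relA : List Char × Bool × Option Char → Option Char × List Char
  | (res, p, od) => (od, if p then ' ' :: res else res)

-- invariant of B's state: a pending space only in code mode over a non-trim character,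
-- never a trailing space in code mode, and the delimiter is never a space
def goodB : List Char × Bool × Option Char → Prop
  | (res, p, od) =>
    (p = true → od = none ∧ ∃ h t, res = h :: t ∧ pvTrimA.contains h = false) ∧
    (od = none → p = false → res.head? ≠ some ' ') ∧
    (∀ d, od = some d → d ≠ ' ')

theorem popSpacesA_id (l : List Char) (h : l.head? ≠ some ' ') : popSpacesA l = l := by
  cases l with
  | nil => rfl
  | cons a t =>
    have : a ≠ ' ' := by simpa using h
    simp [popSpacesA.eq_def, this]

theorem popSpacesA_cons_space (l : List Char) : popSpacesA (' ' :: l) = popSpacesA l := by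
  rw [popSpacesA.eq_def]
  simp

theorem trimA_eq_trimB : pvTrimA = pvTrimB := by decide

theorem opsA_eq_opsB : pvOpsA = pvOpsB := by decide

theorem space_in_trim : pvTrimA.contains ' ' = true := by decide

theorem step_sim (st : List Char × Bool × Option Char) (c : Char) (hg : goodB st) :
    relA (bstep st c) = mstepA (relA st) c ∧ goodB (bstep st c) := by
  obtain ⟨res, p, od⟩ := st
  obtain ⟨h1, h2, h3⟩ := hg
  cases od with
  | some d =>
    have hp : p = false := by
      cases p
      · rfl
      · exact absurd (h1 rfl).1 (by simp)
    subst hp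
    have hd : d ≠ ' ' := h3 d rfl
    refine ⟨?_, ?_⟩
    · simp only [relA, bstep, mstepA, Bool.false_eq_true, if_false]
      split_ifs <;> simp_all
    · simp only [bstep]
      split_ifs with hcond
      · refine ⟨by simp, ?_, by simp⟩
        intro _ _
        simp only [List.head?_cons, ne_eq, Option.some.injEq]
        rw [hcond.1]; exact hd
      · exact ⟨by simp, by simp, fun d' h => (Option.some.inj h) ▸ hd⟩
  | none =>
    by_cases hq : c = '"' ∨ c = '\'' ∨ c = '`'
    · refine ⟨?_, ?_⟩
      · simp [relA, bstep, mstepA, hq]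
      · simp only [bstep, if_pos hq]
        refine ⟨by simp, by simp, ?_⟩
        intro d' h
        rw [← Option.some.inj h]
        rcases hq with rfl | rfl | rfl <;> decide
    · by_cases hs : PySem.Chars.isspace c = true
      · cases p with
        | true =>
          obtain ⟨_, h, t, hres, hht⟩ := h1 rfl
          subst hres
          have hb : (pvTrimB.contains h) = false := by rw [← trimA_eq_trimB]; exact hht
          refine ⟨?_, ?_⟩
          · simp [relA, bstep, mstepA, hq, hs, show (' ' ∈ pvTrimA) from by decide, show (h ∉ pvTrimB) from by simpa using hb]
          · simp only [bstep, if_neg hq, if_pos hs, hb]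
            exact ⟨fun _ => ⟨rfl, h, t, rfl, hht⟩, by simp, by simp⟩
        | false =>
          cases res with
          | nil =>
            refine ⟨by simp [relA, bstep, mstepA, hq, hs], ?_⟩
            simp only [bstep, if_neg hq, if_pos hs]
            exact ⟨by simp, by simp, by simp⟩
          | cons h t =>
            by_cases hht : pvTrimA.contains h = true
            · have hb : pvTrimB.contains h = true := by rw [← trimA_eq_trimB]; exact hht
              have hm : h ∈ pvTrimA := by simpa using hht
              have hmB : h ∈ pvTrimB := by simpa using hb
              refine ⟨?_, ?_⟩
              · simp [relA, bstep, mstepA, hq, hs, hm, hmB]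
              · simp only [bstep, if_neg hq, if_pos hs, hb]
                exact ⟨by simp, fun _ _ => h2 rfl rfl, by simp⟩
            · have hb : pvTrimB.contains h = false := by
                rw [← trimA_eq_trimB]; simpa using hht
              have hm : h ∉ pvTrimA := by simpa using hht
              have hmB : h ∉ pvTrimB := by simpa using hb
              refine ⟨?_, ?_⟩
              · simp [relA, bstep, mstepA, hq, hs, hm, hmB]
              · simp only [bstep, if_neg hq, if_pos hs, hb]
                exact ⟨fun _ => ⟨rfl, h, t, rfl, by simpa using hht⟩, by simp, by simp⟩
      · by_cases ho : pvOpsA.contains c = true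
        · have hoB : pvOpsB.contains c = true := by rw [← opsA_eq_opsB]; exact ho
          have hc : c ≠ ' ' := by
            intro hc; rw [hc] at ho; exact absurd ho (by decide)
          have hpop : popSpacesA (if p then ' ' :: res else res) = res := by
            cases p with
            | true =>
              obtain ⟨_, h, t, hres, hht⟩ := h1 rfl
              have hne : h ≠ ' ' := by
                intro hh; rw [hh] at hht; rw [space_in_trim] at hht; exact absurd hht (by simp)
              subst hres
              rw [if_pos rfl]
              rw [popSpacesA_cons_space]
              exact popSpacesA_id _ (by simpa using hne)
            | false =>
              rw [if_neg (by simp)]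
              exact popSpacesA_id res (h2 rfl rfl)
          refine ⟨?_, ?_⟩
          · simp [relA, bstep, mstepA, hq, hs, hpop, show (c ∈ pvOpsA) from by simpa using ho, show (c ∈ pvOpsB) from by simpa using hoB]
          · simp only [bstep, if_neg hq, if_neg hs, if_pos hoB]
            exact ⟨by simp, fun _ _ => by simpa using hc, by simp⟩

        · have hoB : pvOpsB.contains c = false := by
            rw [← opsA_eq_opsB]; simpa using ho
          have hc : c ≠ ' ' := by
            intro hc; rw [hc] at hs; exact absurd hs (by decide)
          have hm : c ∉ pvOpsA := by simpa using ho
          refine ⟨?_, ?_⟩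
          · simp [relA, bstep, mstepA, hq, hs, hm, show (c ∉ pvOpsB) from by simpa using hoB]
          · simp only [bstep, if_neg hq, if_neg hs, hoB, Bool.false_eq_true, if_false]
            exact ⟨by simp, fun _ _ => by simpa using hc, by simp⟩

theorem fold_sim (js : List Char) : ∀ st, goodB st →
    js.foldl mstepA (relA st) = relA (js.foldl bstep st) ∧ goodB (js.foldl bstep st) := by
  induction js with
  | nil => intro st hg; exact ⟨rfl, hg⟩
  | cons c rest ih =>
    intro st hg
    obtain ⟨hrel, hgood⟩ := step_sim st c hg
    simpa [List.foldl, hrel] using ih (bstep st c) hgood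

theorem lstrip_append (l m : List Char) :
    PySem.Chars.lstrip (l ++ m) =
      if PySem.Chars.lstrip l = [] then PySem.Chars.lstrip m else PySem.Chars.lstrip l ++ m := by
  induction l with
  | nil => simp [PySem.Chars.lstrip]
  | cons c t ih =>
    by_cases hc : PySem.Chars.isspace c = true
    · simpa [PySem.Chars.lstrip, hc] using ih
    · simp [PySem.Chars.lstrip, hc]

theorem rstrip_append_space (l : List Char) :
    PySem.Chars.rstrip (l ++ [' ']) = PySem.Chars.rstrip l := by
  simp [PySem.Chars.rstrip, show PySem.Chars.isspace ' ' = true from by decide]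

theorem strip_append_space (l : List Char) :
    PySem.Chars.strip (l ++ [' ']) = PySem.Chars.strip l := by
  unfold PySem.Chars.strip
  rw [lstrip_append]
  split_ifs with h
  · rw [h]
    decide
  · exact rstrip_append_space _

-- ===== VERDICT (by name: the statement is the Claim_ definition above) =====
theorem minify_js_spec : Claim_equal_minify_js := by
  intro value _
  unfold Spec_minify_js
  show PySem.Str.strip (String.ofList
      ((stripGo none none false false value.toList).foldl mstepA (none, [])).2.reverse) =
    PySem.Str.strip (String.ofList
      (((bCode value.toList).foldl bstep ([], false, none)).1.reverse))
  rw [(stripEq value.toList.length value.toList le_rfl).1 none]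
  have hinit : goodB ([], false, none) := ⟨by simp, by simp, by simp⟩
  obtain ⟨hfold, hgood⟩ := fold_sim (bCode value.toList) ([], false, none) hinit
  have hrel : relA ([], false, none) = ((none : Option Char), ([] : List Char)) := rfl
  rw [← hrel, hfold]
  set fin := (bCode value.toList).foldl bstep ([], false, none) with hfin
  clear_value fin
  obtain ⟨res, p, od⟩ := fin
  cases p with
  | false => rfl
  | true =>
    show PySem.Str.strip (String.ofList (' ' :: res).reverse) =
      PySem.Str.strip (String.ofList res.reverse)
    simp only [PySem.Str.strip, String.toList_ofList, List.reverse_cons]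
    rw [strip_append_space]
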